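-- pv_equiv track=rewrite | github.com/team-mirai/random | pr_analysis/fetch_raw_content.py | find_section_for_line
-- ===== SOURCE A (Python) =====
-- def find_section_for_line(section_hierarchy, line_num):
--     """Find the section for a given line number."""
--     section_starts = sorted(section_hierarchy.keys())
--
--     for i in range(len(section_starts) - 1):
--         if section_starts[i] <= line_num < section_starts[i + 1]:
--             return section_hierarchy[section_starts[i]]
--
--     if section_starts and line_num >= section_starts[-1]:
--         return section_hierarchy[section_starts[-1]]
--
--     return "Unknown section"
-- ===== SOURCE B (Python) =====
-- def find_section_for_line(section_hierarchy, line_num):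
--     """Find the section for a given line number."""
--     candidates = [k for k in section_hierarchy if k <= line_num]
--     if not candidates:
--         return "Unknown section"
--     return section_hierarchy[max(candidates)]
-- ===== Notes on version B (the rewrite author's own statement) =====
-- stated objective: faster
-- what changed: Replaced sort-then-adjacent-interval-scan with one filtering pass collecting the keys <= line_num and a single max, then one lookup.
import Mathlib
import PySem

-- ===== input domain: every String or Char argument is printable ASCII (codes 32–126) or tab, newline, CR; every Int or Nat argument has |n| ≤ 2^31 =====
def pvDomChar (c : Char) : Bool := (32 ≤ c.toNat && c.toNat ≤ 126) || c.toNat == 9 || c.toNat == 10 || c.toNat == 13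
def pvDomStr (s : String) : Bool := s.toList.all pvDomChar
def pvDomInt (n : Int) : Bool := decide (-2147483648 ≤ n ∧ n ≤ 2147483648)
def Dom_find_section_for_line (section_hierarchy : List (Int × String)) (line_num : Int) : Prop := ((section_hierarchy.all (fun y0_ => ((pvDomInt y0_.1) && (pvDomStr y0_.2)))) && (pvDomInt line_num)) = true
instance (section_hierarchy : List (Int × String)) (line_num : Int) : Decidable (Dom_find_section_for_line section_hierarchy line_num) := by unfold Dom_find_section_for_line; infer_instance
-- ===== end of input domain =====

-- B replaces A's sort + adjacent-interval scan by a single running-max pass over the keys (objective: faster).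

-- ===== PORT A =====
-- the 'for i in range(len(section_starts) - 1)' loop with its early return, as a scan over adjacent pairs
def pvLoopA (d : PySem.Dict Int String) (n : Int) : List Int → Option String
  | a :: b :: rest => if a ≤ n ∧ n < b then some (d.getD a "") else pvLoopA d n (b :: rest)
  | _ => none

-- the code after the loop ('if section_starts and line_num >= section_starts[-1]: …; return "Unknown section"')
def pvFallbackA (d : PySem.Dict Int String) (n : Int) (starts : List Int) : String :=
  match starts.getLast? with
  | some last => if n ≥ last then d.getD last "" else "Unknown section"
  | none => "Unknown section"

def find_section_for_line (section_hierarchy : List (Int × String)) (line_num : Int) : String :=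
  let d := PySem.Dict.ofList section_hierarchy
  let starts := PySem.List.sorted d.keys (fun x => x) false
  match pvLoopA d line_num starts with
  | some v => v
  | none => pvFallbackA d line_num starts

-- ===== PORT B =====
def find_section_for_line_alt (section_hierarchy : List (Int × String)) (line_num : Int) : String :=
  let d := PySem.Dict.ofList section_hierarchy
  let candidates := d.keys.filter (fun k => decide (k ≤ line_num))
  -- 'if not candidates: return "Unknown section"; return section_hierarchy[max(candidates)]'
  -- (max(candidates) is PySem.List.max?; it is none exactly when candidates is empty)
  match PySem.List.max? candidates (fun x => x) with
  | none => "Unknown section"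
  | some m => d.getD m ""

-- ===== PRECONDITION & SPEC =====
def Spec_find_section_for_line (section_hierarchy : List (Int × String)) (line_num : Int) (out : String) : Prop := out = find_section_for_line_alt section_hierarchy line_num
instance (section_hierarchy : List (Int × String)) (line_num : Int) (out : String) : Decidable (Spec_find_section_for_line section_hierarchy line_num out) := by unfold Spec_find_section_for_line; infer_instance

-- ===== CLAIM (what is proved, stated in full; the proofs are below) =====
def Claim_equal_find_section_for_line : Prop := ∀ (section_hierarchy : List (Int × String)) (line_num : Int), Dom_find_section_for_line section_hierarchy line_num → Spec_find_section_for_line section_hierarchy line_num (find_section_for_line section_hierarchy line_num)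

-- ===== LEMMAS AND PROOFS =====

-- the optional maximum of a list, as "head seeded running max"
def pvBestOf : List Int → Option Int
  | [] => none
  | h :: t => some (t.foldl max h)

lemma pvBestOf_eq_none {c : List Int} : pvBestOf c = none ↔ c = [] := by
  cases c <;> simp [pvBestOf]

lemma pvBestOf_char {c : List Int} {m : Int} (h : pvBestOf c = some m) :
    m ∈ c ∧ ∀ y ∈ c, y ≤ m := by
  cases c with
  | nil => simp [pvBestOf] at h
  | cons a t =>
    simp only [pvBestOf, Option.some.injEq] at h
    subst h
    refine ⟨?_, ?_⟩
    · rcases PySem.List.foldl_max_mem t a with h | h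
      · rw [h]; exact List.mem_cons_self
      · exact List.mem_cons_of_mem _ h
    · intro y hy
      rcases List.mem_cons.1 hy with rfl | hy
      · exact (PySem.List.le_foldl_max t y).1
      · exact (PySem.List.le_foldl_max t a).2 y hy

lemma pvBestOf_perm {c₁ c₂ : List Int} (h : c₁.Perm c₂) : pvBestOf c₁ = pvBestOf c₂ := by
  cases h1 : pvBestOf c₁ with
  | none =>
    rw [pvBestOf_eq_none] at h1; subst h1
    rw [eq_comm, pvBestOf_eq_none]
    exact h.symm.eq_nil
  | some m₁ =>
    cases h2 : pvBestOf c₂ with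
    | none =>
      rw [pvBestOf_eq_none] at h2; subst h2
      rw [h.eq_nil] at h1; simp [pvBestOf] at h1
    | some m₂ =>
      obtain ⟨hm1, hle1⟩ := pvBestOf_char h1
      obtain ⟨hm2, hle2⟩ := pvBestOf_char h2
      have e1 : m₁ ≤ m₂ := hle2 m₁ (h.mem_iff.1 hm1)
      have e2 : m₂ ≤ m₁ := hle1 m₂ (h.symm.mem_iff.1 hm2)
      rw [le_antisymm e1 e2]

-- max(candidates) with no key is the head-seeded running max
lemma pvMax?_eq_bestOf (c : List Int) : PySem.List.max? c (fun x => x) = pvBestOf c := by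
  cases c with
  | nil => simp [PySem.List.max?_eq_none_iff, pvBestOf]
  | cons a t => simp [PySem.List.max?_id_cons, pvBestOf]

-- A's loop+fallback on a strictly increasing list returns the value at the largest key ≤ n
lemma pvAcore (d : PySem.Dict Int String) (n : Int) (s : List Int)
    (hs : s.Pairwise (· < ·)) :
    (match pvLoopA d n s with
     | some v => v
     | none => pvFallbackA d n s)
    = match pvBestOf (s.filter (fun k => decide (k ≤ n))) with
      | none => "Unknown section"
      | some m => d.getD m "" := by
  induction s with
  | nil => simp [pvLoopA, pvFallbackA, pvBestOf]
  | cons a tl ih =>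
    cases tl with
    | nil =>
      by_cases h : a ≤ n
      · simp [pvLoopA, pvFallbackA, pvBestOf, h]
      · simp [pvLoopA, pvFallbackA, pvBestOf, h]
    | cons b rest =>
      have hab : a < b := (List.pairwise_cons.1 hs).1 b List.mem_cons_self
      have htl : (b :: rest).Pairwise (· < ·) := (List.pairwise_cons.1 hs).2
      by_cases h1 : a ≤ n ∧ n < b
      · -- loop hits at the first pair: everything in b :: rest exceeds n
        have hfil : (b :: rest).filter (fun k => decide (k ≤ n)) = [] := by
          rw [List.filter_eq_nil_iff]
          intro x hx
          have : b ≤ x := by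
            rcases List.mem_cons.1 hx with rfl | hx
            · exact le_refl x
            · exact le_of_lt ((List.pairwise_cons.1 htl).1 x hx)
          simp; omega
        simp [pvLoopA, h1, hfil, pvBestOf]
      · have hloop : pvLoopA d n (a :: b :: rest) = pvLoopA d n (b :: rest) := by
          simp [pvLoopA, h1]
        have hfall : pvFallbackA d n (a :: b :: rest) = pvFallbackA d n (b :: rest) := by
          simp [pvFallbackA, List.getLast?_cons_cons]
        rw [hloop, hfall, ih htl]
        -- the filtered best agrees: either a > n (a is dropped) or b ≤ n dominates a
        by_cases h2 : a ≤ n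
        · have hbn : b ≤ n := by omega
          have hfa : (a :: b :: rest).filter (fun k => decide (k ≤ n))
              = a :: b :: rest.filter (fun k => decide (k ≤ n)) := by
            simp [h2, hbn]
          have hfb : (b :: rest).filter (fun k => decide (k ≤ n))
              = b :: rest.filter (fun k => decide (k ≤ n)) := by
            simp [hbn]
          rw [hfa, hfb]
          simp only [pvBestOf, List.foldl_cons]
          have hmax : max a b = b := by omega
          rw [hmax]
        · have hskip : (a :: b :: rest).filter (fun k => decide (k ≤ n))
              = (b :: rest).filter (fun k => decide (k ≤ n)) := by
            simp [List.filter_cons, h2]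
          rw [hskip]

lemma pv_sorted_strict (ks : List Int) (hnd : ks.Nodup) :
    (PySem.List.sorted ks (fun x => x) false).Pairwise (· < ·) := by
  have hle : (PySem.List.sorted ks (fun x => x) false).Pairwise (fun a b => a ≤ b) :=
    PySem.List.sorted_pairwise ks (fun x => x) 
  have hnd' : (PySem.List.sorted ks (fun x => x) false).Nodup :=
    (PySem.List.sorted_perm ks (fun x => x) false).nodup_iff.2 hnd
  have := hle.and hnd'
  exact this.imp (fun h => lt_of_le_of_ne h.1 h.2)

-- ===== VERDICT (by name: the statement is the Claim_ definition above) =====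
theorem find_section_for_line_spec : Claim_equal_find_section_for_line := by
  intro h n _
  unfold Spec_find_section_for_line
  have key : ∀ (d : PySem.Dict Int String), d.keys.Nodup →
      (match pvLoopA d n (PySem.List.sorted d.keys (fun x => x) false) with
       | some v => v
       | none => pvFallbackA d n (PySem.List.sorted d.keys (fun x => x) false))
      = (match PySem.List.max? (d.keys.filter (fun k => decide (k ≤ n))) (fun x => x) with
         | none => "Unknown section"
         | some m => d.getD m "") := by
    intro d hnd
    rw [pvAcore d n _ (pv_sorted_strict d.keys hnd), pvMax?_eq_bestOf,
      pvBestOf_perm (((PySem.List.sorted_perm d.keys (fun x => x) false).filter _))]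
  exact key (PySem.Dict.ofList h) (PySem.Dict.nodup_keys_ofList h)
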